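-- pv_equiv track=rewrite | github.com/huangketsudou/algorithms | kickstart.py | getSmallnumber
-- ===== SOURCE A (Python) =====
-- def getSmallnumber(number, firsteven):
--     marked = firsteven
--     divisor = number
--     res = 0
--     while marked > 0:
--         res = divisor % 10
--         divisor = divisor // 10
--         marked -= 1
--     numberofeight = 0
--     resEven = firsteven
--     while resEven - 2 >= 0:
--         numberofeight += 8 * pow(10, resEven - 2)
--         resEven -= 1
--     return divisor * pow(10, firsteven) + (res - 1) * pow(10, firsteven - 1) + numberofeight
-- ===== SOURCE B (Python) =====
-- def getSmallnumber(number, firsteven):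
--     if firsteven <= 0:
--         return number
--     p = 10 ** (firsteven - 1)
--     return (number // (10 * p)) * 10 * p + (number // p % 10 - 1) * p + 8 * (p - 1) // 9
-- ===== Notes on version B (the rewrite author's own statement) =====
-- stated objective: faster
-- what changed: Both while-loops are replaced by closed-form arithmetic: the kept prefix and the modified digit come from one floor-division by 10**(firsteven-1), and the trailing 88...8 repdigit from the geometric-series formula 8*(10**(firsteven-1)-1)//9.
-- outside the precondition, e.g. on getSmallnumber(123, 0): A returns 122.9, B returns 123; on getSmallnumber(123, -1): A returns 12.290000000000001, B returns 123
import Mathlib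
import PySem

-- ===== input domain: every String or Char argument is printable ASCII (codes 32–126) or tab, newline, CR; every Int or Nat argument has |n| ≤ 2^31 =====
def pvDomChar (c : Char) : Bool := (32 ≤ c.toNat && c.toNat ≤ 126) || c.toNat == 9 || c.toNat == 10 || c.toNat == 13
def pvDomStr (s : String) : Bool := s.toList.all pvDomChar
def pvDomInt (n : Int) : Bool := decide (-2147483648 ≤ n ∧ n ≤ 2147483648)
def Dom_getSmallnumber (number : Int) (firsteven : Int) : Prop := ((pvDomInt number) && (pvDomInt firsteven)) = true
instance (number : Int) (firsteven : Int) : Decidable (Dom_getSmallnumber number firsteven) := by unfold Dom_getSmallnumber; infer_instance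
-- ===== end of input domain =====

-- B replaces both digit while-loops of A with closed-form floor-division arithmetic (simpler, no iteration); equivalence proved for firsteven ≥ 1.


-- ===== PORT A =====
-- first while-loop: res = divisor % 10; divisor = divisor // 10; runs `marked` = firsteven times
def pvDigitLoop : Nat → Int → Int → Int × Int
  | 0, divisor, res => (divisor, res)
  | n + 1, divisor, _res => pvDigitLoop n (PySem.Int.floordiv divisor 10) (PySem.Int.mod divisor 10)

-- second while-loop: numberofeight += 8 * 10^(resEven-2); resEven -= 1; runs (firsteven-1) times
def pvEightLoop : Nat → Int → Int → Int
  | 0, _resEven, acc => acc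
  | n + 1, resEven, acc => pvEightLoop n (resEven - 1) (acc + 8 * 10 ^ (resEven - 2).toNat)

def getSmallnumber (number : Int) (firsteven : Int) : Int :=
  let (divisor, res) := pvDigitLoop firsteven.toNat number 0
  let numberofeight := pvEightLoop (firsteven - 1).toNat firsteven 0
  divisor * 10 ^ firsteven.toNat + (res - 1) * 10 ^ (firsteven - 1).toNat + numberofeight

-- ===== PORT B =====
def getSmallnumber_alt (number : Int) (firsteven : Int) : Int :=
  if firsteven ≤ 0 then number
  else
    let p : Int := 10 ^ (firsteven - 1).toNat
    PySem.Int.floordiv number (10 * p) * 10 * p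
      + (PySem.Int.mod (PySem.Int.floordiv number p) 10 - 1) * p
      + PySem.Int.floordiv (8 * (p - 1)) 9

-- ===== PRECONDITION & SPEC =====
-- Pre_ excludes firsteven ≤ 0: there Python A's pow(10, firsteven-1) (and for firsteven < 0 also
-- pow(10, firsteven)) is a float, so A returns a float instead of an int (not a value of type Int).
def Pre_getSmallnumber (number : Int) (firsteven : Int) : Prop := 1 ≤ firsteven
instance (number : Int) (firsteven : Int) : Decidable (Pre_getSmallnumber number firsteven) := by unfold Pre_getSmallnumber; infer_instance
def pvWitness_getSmallnumber : Int × Int := (12345, 3)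

def Spec_getSmallnumber (number : Int) (firsteven : Int) (out : Int) : Prop := out = getSmallnumber_alt number firsteven
instance (number : Int) (firsteven : Int) (out : Int) : Decidable (Spec_getSmallnumber number firsteven out) := by unfold Spec_getSmallnumber; infer_instance

-- ===== CLAIM (what is proved, stated in full; the proofs are below) =====
def Claim_equal_getSmallnumber : Prop := ∀ (number : Int) (firsteven : Int), Dom_getSmallnumber number firsteven → Pre_getSmallnumber number firsteven → Spec_getSmallnumber number firsteven (getSmallnumber number firsteven)

-- ===== LEMMAS AND PROOFS =====

theorem pvFdivPow (n : Int) (k : Nat) :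
    PySem.Int.floordiv (PySem.Int.floordiv n 10) (10 ^ k) = PySem.Int.floordiv n (10 ^ (k + 1)) := by
  rw [PySem.Int.floordiv_eq_ediv_of_pos (by norm_num), PySem.Int.floordiv_eq_ediv_of_pos (by positivity),
      PySem.Int.floordiv_eq_ediv_of_pos (by positivity), Int.ediv_ediv_of_nonneg (by norm_num),
      pow_succ']

theorem pvDigitLoop_eq (k : Nat) (n r : Int) :
    pvDigitLoop (k + 1) n r =
      (PySem.Int.floordiv n (10 ^ (k + 1)), PySem.Int.mod (PySem.Int.floordiv n (10 ^ k)) 10) := by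
  induction k generalizing n r with
  | zero => simp [pvDigitLoop]
  | succ k ih =>
    show pvDigitLoop (k + 1) (PySem.Int.floordiv n 10) (PySem.Int.mod n 10) = _
    rw [ih, pvFdivPow, pvFdivPow]

-- repunit 1…1 with k ones
def pvRep : Nat → Int
  | 0 => 0
  | k + 1 => pvRep k + 10 ^ k

theorem pvEightLoop_eq (k : Nat) (acc : Int) :
    pvEightLoop k ((k : Int) + 1) acc = acc + 8 * pvRep k := by
  induction k generalizing acc with
  | zero => simp [pvEightLoop, pvRep]
  | succ k ih =>
    show pvEightLoop k ((k : Int) + 1 + 1 - 1) (acc + 8 * 10 ^ (((k : Int) + 1 + 1) - 2).toNat) = _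
    have h1 : ((k : Int) + 1 + 1 - 1) = (k : Int) + 1 := by ring
    have h2 : (((k : Int) + 1 + 1) - 2).toNat = k := by omega
    rw [h1, h2, ih, pvRep]
    ring

theorem pvRep_nine (k : Nat) : 9 * pvRep k + 1 = 10 ^ k := by
  induction k with
  | zero => simp [pvRep]
  | succ k ih => simp only [pvRep, pow_succ]; linarith

-- ===== VERDICT (by name: the statement is the Claim_ definition above) =====
theorem getSmallnumber_spec : Claim_equal_getSmallnumber := by
  intro n f _ hpre
  have hf1 : (1 : Int) ≤ f := hpre
  obtain ⟨m, hm⟩ : ∃ m : Nat, f = (m : Int) + 1 := ⟨(f - 1).toNat, by omega⟩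
  subst hm
  have ht : ((m : Int) + 1).toNat = m + 1 := by omega
  have ht2 : ((m : Int) + 1 - 1).toNat = m := by omega
  have hfneg : ¬ ((m : Int) + 1 ≤ 0) := by omega
  show getSmallnumber n ((m : Int) + 1) = getSmallnumber_alt n ((m : Int) + 1)
  unfold getSmallnumber getSmallnumber_alt
  rw [if_neg hfneg, ht, ht2, pvDigitLoop_eq, pvEightLoop_eq]
  have h9 : PySem.Int.floordiv (8 * ((10 : Int) ^ m - 1)) 9 = 8 * pvRep m := by
    rw [PySem.Int.floordiv_eq_ediv_of_pos (by norm_num)]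
    have h : (8 : Int) * (10 ^ m - 1) = 9 * (8 * pvRep m) := by
      have := pvRep_nine m; linarith
    rw [h, Int.mul_ediv_cancel_left _ (by norm_num)]
  have hp : (10 : Int) ^ (m + 1) = 10 * 10 ^ m := pow_succ' 10 m
  simp only [h9, hp]
  ring
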